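-- pv_equiv track=rewrite | github.com/LMSE/kinGEMs | kinGEMs/modeling/optimize.py | _parse_gpr_to_dnf
-- ===== SOURCE A (Python) =====
-- from itertools import product
--
-- def _parse_gpr_to_dnf(tokens):
--     """
--     Parse tokens into Disjunctive Normal Form (DNF):
--     returns a list of clauses, each clause is a list of gene IDs.
--     e.g. "g1 and (g2 or g3)" -> [['g1','g2'], ['g1','g3']]
--     """
--     def parse_expression(idx=0):
--         clauses, idx = parse_term(idx)
--         while idx < len(tokens) and tokens[idx] == 'or':
--             right, idx = parse_term(idx+1)
--             clauses += right
--         return clauses, idx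
--
--     def parse_term(idx):
--         clauses, idx = parse_factor(idx)
--         while idx < len(tokens) and tokens[idx] == 'and':
--             right, idx = parse_factor(idx+1)
--             clauses = [c1 + c2 for c1, c2 in product(clauses, right)]
--         return clauses, idx
--
--     def parse_factor(idx):
--         tok = tokens[idx]
--         if tok == '(':
--             clauses, idx = parse_expression(idx+1)
--             if tokens[idx] != ')':
--                 raise ValueError(f"Mismatched parentheses in GPR: {tokens}")
--             return clauses, idx+1
--         else:
--             return [[tok]], idx+1
--
--     dnf, _ = parse_expression(0)
--     # dedupe and sort
--     unique = []
--     for clause in dnf: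
--         cl = sorted(set(clause))
--         if cl not in unique:
--             unique.append(cl)
--     return unique
-- ===== SOURCE B (Python) =====
-- def _parse_gpr_to_dnf(tokens):
--     """
--     One-pass stack evaluator: instead of recursive descent, scan tokens left to
--     right keeping, per parenthesis level, the DNF accumulated so far (acc = the
--     finished 'or'-alternatives, cur = the current 'and'-term).  An operand
--     multiplies into cur, 'or' flushes cur into acc, '(' pushes a frame and ')'
--     pops it, multiplying the inner DNF into the parent's cur.  Scanning stops at
--     the first token that cannot extend the expression (trailing tokens are
--     discarded, as in the original).
--     """
--     stack = []
--     acc, cur = [], [[]]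
--     expect_operand = True
--     for tok in tokens:
--         if expect_operand:
--             if tok == '(':
--                 stack.append((acc, cur))
--                 acc, cur = [], [[]]
--             else:
--                 cur = [c1 + [tok] for c1 in cur]
--                 expect_operand = False
--         elif tok == 'and':
--             expect_operand = True
--         elif tok == 'or':
--             acc = acc + cur
--             cur = [[]]
--             expect_operand = True
--         elif tok == ')' and stack:
--             inner = acc + cur
--             acc, cur = stack.pop()
--             cur = [c1 + c2 for c1 in cur for c2 in inner]
--         else:
--             break
--     dnf = acc + cur
--     unique = []
--     for clause in dnf:
--         cl = sorted(set(clause))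
--         if cl not in unique:
--             unique.append(cl)
--     return unique
-- ===== Notes on version B (the rewrite author's own statement) =====
-- stated objective: alternative
-- what changed: Replaces the three mutually recursive descent parsers by a single left-to-right pass that keeps, per parenthesis level, a stack of (finished or-alternatives, current and-term) DNF pairs, combining clauses eagerly as tokens arrive instead of returning sub-results up a call tree; the dedup-and-sort tail is unchanged.
import Mathlib
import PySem

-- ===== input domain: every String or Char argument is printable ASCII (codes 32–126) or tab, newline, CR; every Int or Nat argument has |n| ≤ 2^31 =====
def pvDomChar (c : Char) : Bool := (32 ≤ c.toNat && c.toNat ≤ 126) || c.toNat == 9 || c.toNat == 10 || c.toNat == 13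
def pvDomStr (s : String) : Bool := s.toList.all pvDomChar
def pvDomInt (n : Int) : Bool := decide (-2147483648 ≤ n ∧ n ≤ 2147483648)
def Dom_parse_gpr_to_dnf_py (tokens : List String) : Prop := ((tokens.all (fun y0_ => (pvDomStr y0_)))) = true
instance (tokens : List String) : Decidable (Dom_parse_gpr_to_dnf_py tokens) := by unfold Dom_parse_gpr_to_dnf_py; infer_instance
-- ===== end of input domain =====

-- B is a one-pass stack evaluator (frames of accumulated DNF pairs) replacing A's recursive descent; same value wherever A returns (objective: alternative).

-- [c1 + c2 for c1, c2 in product(l, r)] — the and-combination comprehension both Python sources contain verbatim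
def pvAndProd (l r : List (List String)) : List (List String) :=
  l.flatMap (fun c1 => r.map (fun c2 => c1 ++ c2))

-- the identical dedup-and-sort tail of both Python functions:
-- for clause in dnf: cl = sorted(set(clause)); if cl not in unique: unique.append(cl)
def pvDedup (dnf : List (List String)) : List (List String) :=
  dnf.foldl (fun unique clause =>
    let cl := PySem.List.sorted (PySem.Set.ofList clause) (fun x => x) false
    if cl ∈ unique then unique else unique ++ [cl]) []

-- ===== PORT A =====
-- A's three nested parsers, transliterated with a fuel parameter (the mutual recursion is not
-- structurally decreasing); none = the Python raises (IndexError on tokens[idx], ValueError on a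
-- missing ')'), or fuel ran out — on Pre_ inputs the top-level fuel is proved sufficient.
mutual
def parseFactorA (tokens : List String) : Nat → Nat → Option (List (List String) × Nat)
  | 0, _ => none
  | f+1, idx =>
    match tokens[idx]? with                      -- tok = tokens[idx]
    | none => none                               -- IndexError
    | some tok =>
      if tok = "(" then
        match parseExprA tokens f (idx+1) with
        | none => none
        | some (cl, j) =>
          match tokens[j]? with                  -- tokens[idx] for the ')' check
          | none => none                         -- IndexError
          | some t => if t ≠ ")" then none else some (cl, j+1)   -- ValueError if not ')'
      else some ([[tok]], idx+1)

def parseTermA (tokens : List String) : Nat → Nat → Option (List (List String) × Nat)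
  | 0, _ => none
  | f+1, idx =>
    match parseFactorA tokens f idx with
    | none => none
    | some (cl, i) => parseTermLoopA tokens f cl i

def parseTermLoopA (tokens : List String) : Nat → List (List String) → Nat → Option (List (List String) × Nat)
  | 0, _, _ => none
  | f+1, cl, i =>
    if tokens[i]? = some "and" then              -- while idx < len(tokens) and tokens[idx] == 'and'
      match parseFactorA tokens f (i+1) with
      | none => none
      | some (r, j) => parseTermLoopA tokens f (pvAndProd cl r) j
    else some (cl, i)

def parseExprA (tokens : List String) : Nat → Nat → Option (List (List String) × Nat)
  | 0, _ => none
  | f+1, idx =>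
    match parseTermA tokens f idx with
    | none => none
    | some (cl, i) => parseExprLoopA tokens f cl i

def parseExprLoopA (tokens : List String) : Nat → List (List String) → Nat → Option (List (List String) × Nat)
  | 0, _, _ => none
  | f+1, cl, i =>
    if tokens[i]? = some "or" then               -- while idx < len(tokens) and tokens[idx] == 'or'
      match parseTermA tokens f (i+1) with
      | none => none
      | some (r, j) => parseExprLoopA tokens f (cl ++ r) j
    else some (cl, i)
end

def parse_gpr_to_dnf_py (tokens : List String) : List (List String) :=
  match parseExprA tokens (3 * tokens.length + 9) 0 with
  | some (dnf, _) => pvDedup dnf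
  | none => []                                   -- unreachable under Pre_ (the Python raises)

-- ===== PORT B =====
-- Source B's single loop: stack of parent (acc, cur) frames, acc/cur the current frame's DNF pair.
def bRun (stack : List (List (List String) × List (List String)))
    (acc cur : List (List String)) (expect : Bool) : List String → List (List String)
  | [] => acc ++ cur
  | tok :: rest =>
    if expect then
      if tok = "(" then bRun ((acc, cur) :: stack) [] [[]] true rest
      else bRun stack acc (cur.map (fun c => c ++ [tok])) false rest
    else if tok = "and" then bRun stack acc cur true rest
    else if tok = "or" then bRun stack (acc ++ cur) [[]] true rest
    else if tok = ")" then
      match stack with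
      | (pacc, pcur) :: st => bRun st pacc (pvAndProd pcur (acc ++ cur)) false rest
      | [] => acc ++ cur                         -- break (')' with empty stack)
    else acc ++ cur                              -- break

def parse_gpr_to_dnf_py_alt (tokens : List String) : List (List String) :=
  pvDedup (bRun [] [] [[]] true tokens)

-- ===== PRECONDITION & SPEC =====
-- Shape check (no parsing): tokens must start with a well-formed parenthesised and/or expression
-- (followed by anything).  This is exactly where the Python A returns normally; it excludes ONLY
-- inputs on which A raises (IndexError on truncated input, ValueError on an unclosed group).
def pvScan (expect : Bool) (depth : Nat) : List String → Bool
  | [] => !expect && depth == 0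
  | t :: ts =>
    if expect then
      (if t = "(" then pvScan true (depth+1) ts else pvScan false depth ts)
    else if t = "and" ∨ t = "or" then pvScan true depth ts
    else if t = ")" then
      match depth with
      | 0 => true
      | d+1 => pvScan false d ts
    else depth == 0

def Pre_parse_gpr_to_dnf_py (tokens : List String) : Prop := pvScan true 0 tokens = true
instance (tokens : List String) : Decidable (Pre_parse_gpr_to_dnf_py tokens) := by
  unfold Pre_parse_gpr_to_dnf_py; infer_instance

def pvWitness_parse_gpr_to_dnf_py : List String := ["g1", "and", "(", "g2", "or", "g3", ")"]

def Spec_parse_gpr_to_dnf_py (tokens : List String) (out : List (List String)) : Prop := out = parse_gpr_to_dnf_py_alt tokens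
instance (tokens : List String) (out : List (List String)) : Decidable (Spec_parse_gpr_to_dnf_py tokens out) := by unfold Spec_parse_gpr_to_dnf_py; infer_instance

-- ===== CLAIM (what is proved, stated in full; the proofs are below) =====
def Claim_equal_parse_gpr_to_dnf_py : Prop := ∀ (tokens : List String), Dom_parse_gpr_to_dnf_py tokens → Pre_parse_gpr_to_dnf_py tokens → Spec_parse_gpr_to_dnf_py tokens (parse_gpr_to_dnf_py tokens)

-- ===== LEMMAS AND PROOFS =====

lemma pvAndProd_one (r : List (List String)) : pvAndProd [[]] r = r := by
  simp [pvAndProd]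

lemma pvAndProd_singleton (cur : List (List String)) (t : String) :
    pvAndProd cur [[t]] = cur.map (fun c => c ++ [t]) := by
  simp only [pvAndProd, List.map_cons, List.map_nil]
  exact (List.map_eq_flatMap).symm

lemma pvAndProd_assoc (a b c : List (List String)) :
    pvAndProd (pvAndProd a b) c = pvAndProd a (pvAndProd b c) := by
  simp only [pvAndProd, List.flatMap_assoc]
  congr 1; funext x
  simp [List.flatMap_map, List.map_flatMap, Function.comp_def, List.append_assoc]

-- the (acc, cur) split is irrelevant when the next token is not 'and' (or the input ends)
lemma bRun_split (ts : List String) (hts : ts.head? ≠ some "and")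
    (st : List (List (List String) × List (List String)))
    (a c a' c' : List (List String)) (h : a ++ c = a' ++ c') :
    bRun st a c false ts = bRun st a' c' false ts := by
  cases ts with
  | nil => simp [bRun, h]
  | cons t rest =>
    by_cases hand : t = "and"
    · subst hand; simp at hts
    · by_cases hor : t = "or"
      · subst hor; simp [bRun, hand, h]
      · by_cases hrp : t = ")"
        · subst hrp; cases st with
          | nil => simp [bRun, hand, hor, h]
          | cons p s => cases p; simp [bRun, hand, hor, h]
        · simp [bRun, hand, hor, hrp, h]

-- the five statements of the simultaneous induction (fuel-indexed)
def PvF (tokens : List String) (f : Nat) : Prop := ∀ idx d,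
  3 * (tokens.length - idx) + 1 ≤ f → pvScan true d (tokens.drop idx) = true →
  ∃ r j, parseFactorA tokens f idx = some (r, j) ∧ idx < j ∧ j ≤ tokens.length ∧
    pvScan false d (tokens.drop j) = true ∧
    ∀ st acc cur, bRun st acc cur true (tokens.drop idx) = bRun st acc (pvAndProd cur r) false (tokens.drop j)

def PvT (tokens : List String) (f : Nat) : Prop := ∀ idx d,
  3 * (tokens.length - idx) + 2 ≤ f → pvScan true d (tokens.drop idx) = true →
  ∃ r j, parseTermA tokens f idx = some (r, j) ∧ idx < j ∧ j ≤ tokens.length ∧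
    pvScan false d (tokens.drop j) = true ∧ (tokens.drop j).head? ≠ some "and" ∧
    ∀ st acc cur, bRun st acc cur true (tokens.drop idx) = bRun st acc (pvAndProd cur r) false (tokens.drop j)

def PvTL (tokens : List String) (f : Nat) : Prop := ∀ cl i d,
  3 * (tokens.length - i) + 3 ≤ f → i ≤ tokens.length → pvScan false d (tokens.drop i) = true →
  ∃ r j, parseTermLoopA tokens f cl i = some (r, j) ∧ i ≤ j ∧ j ≤ tokens.length ∧
    pvScan false d (tokens.drop j) = true ∧ (tokens.drop j).head? ≠ some "and" ∧
    ∀ st acc cur, bRun st acc (pvAndProd cur cl) false (tokens.drop i) = bRun st acc (pvAndProd cur r) false (tokens.drop j)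

def PvE (tokens : List String) (f : Nat) : Prop := ∀ idx d,
  3 * (tokens.length - idx) + 3 ≤ f → pvScan true d (tokens.drop idx) = true →
  ∃ r j, parseExprA tokens f idx = some (r, j) ∧ idx < j ∧ j ≤ tokens.length ∧
    pvScan false d (tokens.drop j) = true ∧ (tokens.drop j).head? ≠ some "and" ∧ (tokens.drop j).head? ≠ some "or" ∧
    ∀ st acc, bRun st acc [[]] true (tokens.drop idx) = bRun st (acc ++ r) [] false (tokens.drop j)

def PvEL (tokens : List String) (f : Nat) : Prop := ∀ cl i d,
  3 * (tokens.length - i) + 4 ≤ f → i ≤ tokens.length → pvScan false d (tokens.drop i) = true →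
  (tokens.drop i).head? ≠ some "and" →
  ∃ r j, parseExprLoopA tokens f cl i = some (r, j) ∧ i ≤ j ∧ j ≤ tokens.length ∧
    pvScan false d (tokens.drop j) = true ∧ (tokens.drop j).head? ≠ some "and" ∧ (tokens.drop j).head? ≠ some "or" ∧
    ∀ st acc, bRun st (acc ++ cl) [] false (tokens.drop i) = bRun st (acc ++ r) [] false (tokens.drop j)

lemma pvMain (tokens : List String) (f : Nat) :
    PvF tokens f ∧ PvT tokens f ∧ PvTL tokens f ∧ PvE tokens f ∧ PvEL tokens f := by
  induction f with
  | zero =>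
    refine ⟨fun idx d h => absurd h (by omega), fun idx d h => absurd h (by omega),
      fun cl i d h => absurd h (by omega), fun idx d h => absurd h (by omega),
      fun cl i d h => absurd h (by omega)⟩
  | succ f ih =>
    obtain ⟨ihF, ihT, ihTL, ihE, ihEL⟩ := ih
    refine ⟨?_, ?_, ?_, ?_, ?_⟩
    -- ===== factor =====
    · intro idx d hfuel hscan
      have hidx : idx < tokens.length := by
        by_contra h
        rw [List.drop_eq_nil_of_le (by omega)] at hscan
        simp [pvScan] at hscan
      have hdrop : tokens.drop idx = tokens[idx] :: tokens.drop (idx+1) :=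
        List.drop_eq_getElem_cons hidx
      by_cases hpar : tokens[idx] = "("
      · -- tok == '(' : parse inner expression, then require ')'
        rw [hdrop, hpar] at hscan
        simp only [pvScan, if_true] at hscan
        obtain ⟨r, j', hE, hij', hj'len, hscan', hand', hor', hB⟩ :=
          ihE (idx+1) (d+1) (by omega) hscan
        have hj'lt : j' < tokens.length := by
          by_contra h
          rw [List.drop_eq_nil_of_le (by omega)] at hscan'
          simp [pvScan] at hscan'
        have hdropj : tokens.drop j' = tokens[j'] :: tokens.drop (j'+1) :=
          List.drop_eq_getElem_cons hj'lt
        rw [hdropj] at hscan' hand' hor'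
        simp only [List.head?_cons, ne_eq, Option.some.injEq] at hand' hor'
        have hrp : tokens[j'] = ")" := by
          by_contra h
          simp [pvScan, hand', hor', h] at hscan'
        rw [hrp] at hdropj hscan'
        simp only [pvScan] at hscan'
        norm_num at hscan'
        have e1 : tokens[idx]? = some "(" := by rw [List.getElem?_eq_getElem hidx, hpar]
        have e2 : tokens[j']? = some ")" := by rw [List.getElem?_eq_getElem hj'lt, hrp]
        refine ⟨r, j'+1, ?_, by omega, by omega, hscan', ?_⟩
        · simp [parseFactorA, e1, hE, e2]
        · intro st acc cur
          rw [hdrop, hpar]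
          simp only [bRun, if_true]
          rw [hB ((acc, cur) :: st) []]
          rw [hdropj]
          simp [bRun]
      · -- atom
        rw [hdrop] at hscan
        simp only [pvScan, if_neg hpar, if_true] at hscan
        refine ⟨[[tokens[idx]]], idx+1, ?_, by omega, by omega, hscan, ?_⟩
        · simp [parseFactorA, List.getElem?_eq_getElem hidx, hpar]
        · intro st acc cur
          rw [hdrop]
          simp only [bRun, if_neg hpar, if_true]
          rw [pvAndProd_singleton]
    -- ===== term =====
    · intro idx d hfuel hscan
      obtain ⟨cl, i, hF, hii, hilen, hscan1, hBF⟩ := ihF idx d (by omega) hscan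
      obtain ⟨r, j, hTL, hij, hjlen, hscan2, hand2, hBTL⟩ :=
        ihTL cl i d (by omega) hilen hscan1
      refine ⟨r, j, ?_, by omega, hjlen, hscan2, hand2, ?_⟩
      · simp [parseTermA, hF, hTL]
      · intro st acc cur
        rw [hBF st acc cur]
        exact hBTL st acc cur
    -- ===== term loop =====
    · intro cl i d hfuel hilen hscan
      by_cases hand : tokens[i]? = some "and"
      · obtain ⟨hi, hieq⟩ := List.getElem?_eq_some_iff.mp hand
        have hdrop : tokens.drop i = "and" :: tokens.drop (i+1) := by
          rw [List.drop_eq_getElem_cons hi, hieq]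
        rw [hdrop] at hscan
        simp only [pvScan] at hscan
        norm_num at hscan
        obtain ⟨r2, j2, hF, hij2, hj2len, hscan1, hBF⟩ := ihF (i+1) d (by omega) hscan
        obtain ⟨r, j, hTL, hjj, hjlen, hscan2, hand2, hBTL⟩ :=
          ihTL (pvAndProd cl r2) j2 d (by omega) hj2len hscan1
        refine ⟨r, j, ?_, by omega, hjlen, hscan2, hand2, ?_⟩
        · simp [parseTermLoopA, hand, hF, hTL]
        · intro st acc cur
          rw [hdrop]
          simp only [bRun]
          norm_num
          rw [hBF st acc (pvAndProd cur cl), pvAndProd_assoc]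
          exact hBTL st acc cur
      · refine ⟨cl, i, ?_, le_refl i, hilen, hscan, ?_, fun st acc cur => rfl⟩
        · simp [parseTermLoopA, hand]
        · rw [List.head?_drop]; exact hand
    -- ===== expression =====
    · intro idx d hfuel hscan
      obtain ⟨cl, i, hT, hii, hilen, hscan1, hand1, hBT⟩ := ihT idx d (by omega) hscan
      obtain ⟨r, j, hEL, hij, hjlen, hscan2, hand2, hor2, hBEL⟩ :=
        ihEL cl i d (by omega) hilen hscan1 hand1
      refine ⟨r, j, ?_, by omega, hjlen, hscan2, hand2, hor2, ?_⟩
      · simp [parseExprA, hT, hEL]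
      · intro st acc
        rw [hBT st acc [[]], pvAndProd_one,
          bRun_split (tokens.drop i) hand1 st acc cl (acc ++ cl) [] (by simp)]
        exact hBEL st acc
    -- ===== expression loop =====
    · intro cl i d hfuel hilen hscan hnand
      by_cases hor : tokens[i]? = some "or"
      · obtain ⟨hi, hieq⟩ := List.getElem?_eq_some_iff.mp hor
        have hdrop : tokens.drop i = "or" :: tokens.drop (i+1) := by
          rw [List.drop_eq_getElem_cons hi, hieq]
        rw [hdrop] at hscan
        simp only [pvScan] at hscan
        norm_num at hscan
        obtain ⟨r2, j2, hT, hij2, hj2len, hscan1, hand1, hBT⟩ := ihT (i+1) d (by omega) hscan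
        obtain ⟨r, j, hEL, hjj, hjlen, hscan2, hand2, hor2, hBEL⟩ :=
          ihEL (cl ++ r2) j2 d (by omega) hj2len hscan1 hand1
        refine ⟨r, j, ?_, by omega, hjlen, hscan2, hand2, hor2, ?_⟩
        · simp [parseExprLoopA, hor, hT, hEL]
        · intro st acc
          rw [hdrop]
          simp only [bRun]
          norm_num
          rw [hBT st (acc ++ cl) [[]], pvAndProd_one,
            bRun_split (tokens.drop j2) hand1 st (acc ++ cl) r2 (acc ++ (cl ++ r2)) [] (by simp)]
          exact hBEL st acc
      · refine ⟨cl, i, ?_, le_refl i, hilen, hscan, hnand, ?_, fun st acc => rfl⟩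
        · simp [parseExprLoopA, hor]
        · rw [List.head?_drop]; exact hor

-- ===== VERDICT (by name: the statement is the Claim_ definition above) =====
theorem parse_gpr_to_dnf_py_spec : Claim_equal_parse_gpr_to_dnf_py := by
  intro tokens _ hpre
  unfold Spec_parse_gpr_to_dnf_py
  obtain ⟨r, j, hA, hij, hjlen, hscan, hand, hor, hB⟩ :=
    (pvMain tokens (3 * tokens.length + 9)).2.2.2.1 0 0 (by omega)
      (by simpa [Pre_parse_gpr_to_dnf_py] using hpre)
  have hBrun : bRun [] [] [[]] true tokens = r := by
    have h := hB [] []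
    simp only [List.drop_zero, List.nil_append] at h
    rw [h]
    cases hdj : tokens.drop j with
    | nil => simp [bRun]
    | cons t rest =>
      rw [hdj] at hand hor
      simp only [List.head?_cons, ne_eq, Option.some.injEq] at hand hor
      by_cases hrp : t = ")"
      · subst hrp; simp [bRun]
      · simp [bRun, hand, hor, hrp]
  unfold parse_gpr_to_dnf_py parse_gpr_to_dnf_py_alt
  rw [hA, hBrun]
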